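-- pv_equiv track=rewrite | github.com/HaneulJung/Programmers | Programmers/Lv. 2/[3차] n진수 게임.py | solution
-- ===== SOURCE A (Python) =====
-- def convertN(num, n):
--     l = {10:'A', 11:'B', 12:'C', 13:'D', 14:'E', 15:'F'}
--
--     if num == 0:
--         return '0'
--
--     temp = ''
--     while num != 0:
--         if num % n >= 10:
--             temp += l[num % n]
--         else:
--             temp += str(num % n)
--         num //= n
--     return temp[::-1]
--
-- def solution(n, t, m, p):
--     answer = ''
--
--     temp = ''
--     num = 0
--     i = p - 1
--     while i < m * t:
--         if i > len(temp) - 1: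
--             temp += convertN(num, n)
--             num += 1
--         else:
--             answer += temp[i]
--             i += m
--
--     return answer
-- ===== SOURCE B (Python) =====
-- def convertN(num, n):  # helper kept verbatim from the original module
--     l = {10:'A', 11:'B', 12:'C', 13:'D', 14:'E', 15:'F'}
--
--     if num == 0:
--         return '0'
--
--     temp = ''
--     while num != 0:
--         if num % n >= 10:
--             temp += l[num % n]
--         else:
--             temp += str(num % n)
--         num //= n
--     return temp[::-1]
--
--
-- def solution(n, t, m, p):
--     # pass 1: the positions to sample
--     idxs = []
--     i = p - 1
--     while i < m * t:
--         idxs.append(i)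
--         i += m
--     # pass 2: generate the concatenated base-n string up to the last position
--     need = idxs[-1] + 1 if idxs else 0
--     pieces = []
--     total = 0
--     num = 0
--     while total < need:
--         s = convertN(num, n)
--         pieces.append(s)
--         total += len(s)
--         num += 1
--     temp = ''.join(pieces)
--     # pass 3: sample
--     return ''.join(temp[i] for i in idxs)
-- ===== Notes on version B (the rewrite author's own statement) =====
-- stated objective: alternative
-- what changed: The convertN helper is kept verbatim; solution itself is restructured: A interleaves generation and sampling in one while-loop over a three-way state (grow temp by convertN or consume temp[i]), while B is three separate passes: collect the sampled positions, generate the concatenated base-n string as a list of pieces joined once just past the last position, then sample each position.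
-- outside the precondition, e.g. on solution(17, 3, 2, 1): A returns '024', B returns '024'; on solution(-3, 3, 2, 1): A returns '0--', B returns '0--'
import Mathlib
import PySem

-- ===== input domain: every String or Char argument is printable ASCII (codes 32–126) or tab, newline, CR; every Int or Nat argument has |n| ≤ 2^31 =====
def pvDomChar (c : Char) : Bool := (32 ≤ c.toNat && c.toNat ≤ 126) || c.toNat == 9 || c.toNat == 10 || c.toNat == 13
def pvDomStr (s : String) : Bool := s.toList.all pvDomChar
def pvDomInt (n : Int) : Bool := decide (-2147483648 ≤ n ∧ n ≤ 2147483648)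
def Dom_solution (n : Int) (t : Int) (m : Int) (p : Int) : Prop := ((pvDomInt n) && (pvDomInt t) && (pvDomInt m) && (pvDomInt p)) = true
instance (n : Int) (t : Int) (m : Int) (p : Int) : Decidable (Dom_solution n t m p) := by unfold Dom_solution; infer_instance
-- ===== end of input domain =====

-- B separates A's interleaved generate-and-sample loop into three passes (positions, generation, sampling); same results, no speed claim.

-- ===== PORT A =====
-- the dict literal l = {10:'A', …, 15:'F'} of convertN
def pvDigitDict : PySem.Dict Int String :=
  (((((PySem.Dict.empty.insert 10 "A").insert 11 "B").insert 12 "C").insert 13 "D").insert 14 "E").insert 15 "F"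

-- the loop body's appended digit characters: l[num % n] if num % n >= 10 else str(num % n)
-- (the .getD "" stands for the KeyError of l[…], which Pre_solution excludes)
def digitChars (n : Int) (num : Int) : List Char :=
  if 10 ≤ PySem.Int.mod num n then ((pvDigitDict.get? (PySem.Int.mod num n)).getD "").toList
  else PySem.Int.toChars (PySem.Int.mod num n)

-- while num != 0: … ; fuel num.toNat + 1 suffices: num strictly decreases while positive (Pre_ gives 2 ≤ n)
def convertNloop (n : Int) : Nat → List Char → Int → List Char
  | 0, temp, _ => temp
  | fuel + 1, temp, num =>
    if num = 0 then temp
    else convertNloop n fuel (temp ++ digitChars n num) (PySem.Int.floordiv num n)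

-- convertN(num, n); the helper is identical in both Python files, so both ports share it
def convertN (num : Int) (n : Int) : List Char :=
  if num = 0 then ['0']
  else (convertNloop n (num.toNat + 1) [] num).reverse

-- A's single while-loop: state (answer, temp, num, i), the two strings as Array Char (Python's str
-- is an array; += is an amortised append).  temp[i] is read as temp.getD i.toNat: under Pre_ the
-- loop only reads i with 0 ≤ i < len(temp), so no negative wraparound or IndexError is reachable.
-- fuel covers the two decreasing quantities under Pre_.
def solLoopA (n m mt : Int) : Nat → Array Char → Array Char → Int → Int → Array Char
  | 0, ans, _, _, _ => ans
  | fuel + 1, ans, temp, num, i =>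
    if i < mt then
      if (temp.size : Int) - 1 < i then
        solLoopA n m mt fuel ans (temp ++ (convertN num n).toArray) (num + 1) i
      else
        solLoopA n m mt fuel (ans.push (temp.getD i.toNat ' ')) temp num (i + m)
    else ans

def solution (n : Int) (t : Int) (m : Int) (p : Int) : String :=
  String.ofList (solLoopA n m (m * t) ((m * t - (p - 1)).toNat + (m * t).toNat + 1) #[] #[] 0 (p - 1)).toList

-- ===== PORT B =====
-- pass 1: while i < m*t: idxs.append(i); i += m   (a Python list is an array; append = push)
def idxLoop (m mt : Int) : Nat → Array Int → Int → Array Int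
  | 0, acc, _ => acc
  | fuel + 1, acc, i => if i < mt then idxLoop m mt fuel (acc.push i) (i + m) else acc

-- pass 2: while total < need: s = convertN(num, n); pieces.append(s); total += len(s); num += 1
def genLoop (n need : Int) : Nat → Array (List Char) → Int → Int → Array (List Char)
  | 0, pieces, _, _ => pieces
  | fuel + 1, pieces, total, num =>
    if total < need then
      genLoop n need fuel (pieces.push (convertN num n)) (total + PySem.List.len (convertN num n)) (num + 1)
    else pieces

-- temp[i] in pass 3 is read as temp.getD i.toNat: every sampled i satisfies 0 ≤ i < len(temp)
-- under Pre_, so no negative wraparound or IndexError is reachable.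
def solution_alt (n : Int) (t : Int) (m : Int) (p : Int) : String :=
  let idxs := (idxLoop m (m * t) ((m * t - (p - 1)).toNat + 1) #[] (p - 1)).toList
  let need := if idxs.isEmpty then 0 else PySem.List.pyGetD idxs (-1) 0 + 1
  let pieces := genLoop n need (need.toNat + 1) #[] 0 0
  let temp := pieces.foldl (fun acc s => acc ++ s.toArray) (#[] : Array Char)   -- ''.join(pieces)
  String.ofList (idxs.map (fun i => temp.getD i.toNat ' '))

-- ===== PRECONDITION & SPEC =====
-- Pre_ keeps the trivial no-sample region (m*t ≤ p-1, where A returns '' at once) and otherwise the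
-- problem's stated constraints 2 ≤ n ≤ 16, m ≥ 1, p ≥ 1: outside them A's digit dict raises KeyError
-- (bases whose digits reach 16), n ∈ {-1,0,1} raises ZeroDivisionError or loops forever, p ≤ 0 raises
-- IndexError, and m ≤ 0 loops forever; on the excluded inputs where A still happens to return
-- (bases > 16 whose digits stay small, negative bases) B returns the same string.
def Pre_solution (n : Int) (t : Int) (m : Int) (p : Int) : Prop :=
  m * t ≤ p - 1 ∨ (1 ≤ p ∧ 1 ≤ m ∧ 2 ≤ n ∧ n ≤ 16)
instance (n : Int) (t : Int) (m : Int) (p : Int) : Decidable (Pre_solution n t m p) := by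
  unfold Pre_solution; infer_instance
def pvWitness_solution : Int × Int × Int × Int := (2, 4, 2, 1)

def Spec_solution (n : Int) (t : Int) (m : Int) (p : Int) (out : String) : Prop := out = solution_alt n t m p
instance (n : Int) (t : Int) (m : Int) (p : Int) (out : String) : Decidable (Spec_solution n t m p out) := by
  unfold Spec_solution; infer_instance

-- ===== CLAIM (what is proved, stated in full; the proofs are below) =====
def Claim_equal_solution : Prop := ∀ (n : Int) (t : Int) (m : Int) (p : Int), Dom_solution n t m p → Pre_solution n t m p → Spec_solution n t m p (solution n t m p)

-- ===== LEMMAS AND PROOFS =====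

-- the infinite digit stream: concatenation of convertN(0), convertN(1), …, convertN(k-1)
def pref (n : Int) (k : Nat) : List Char := ((List.range k).map (fun j => convertN (j : Int) n)).flatten

-- the stream character at position i (0 ≤ i), read from a long-enough prefix
def stream (n : Int) (i : Int) : Char := (pref n (i.toNat + 1)).getD i.toNat ' '

-- the list of sampled positions p-1, p-1+m, … (< m*t), as a well-founded recursion
def idxSeq (m mt i : Int) : List Int :=
  if _h : 1 ≤ m ∧ i < mt then i :: idxSeq m mt (i + m) else []
termination_by (mt - i).toNat
decreasing_by omega

lemma digitChars_pos (n num : Int) (hn2 : 2 ≤ n) (hn16 : n ≤ 16) : 0 < (digitChars n num).length := by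
  have h0 : 0 ≤ PySem.Int.mod num n := PySem.Int.mod_nonneg num (by omega)
  have h1 : PySem.Int.mod num n < n := PySem.Int.mod_lt num (by omega)
  unfold digitChars
  obtain ⟨d, hd⟩ : ∃ d, PySem.Int.mod num n = d := ⟨_, rfl⟩
  rw [hd] at h0 h1 ⊢
  have h2 : d < 16 := by omega
  interval_cases d <;> decide

lemma convertNloop_length_mono (n : Int) : ∀ (fuel : Nat) (temp : List Char) (num : Int),
    temp.length ≤ (convertNloop n fuel temp num).length := by
  intro fuel
  induction fuel with
  | zero => intro temp num; simp [convertNloop]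
  | succ f ih =>
    intro temp num
    simp only [convertNloop]
    split
    · exact le_refl _
    · calc temp.length ≤ (temp ++ digitChars n num).length := by simp
        _ ≤ _ := ih _ _

lemma convertN_length_pos (n k : Int) (hn2 : 2 ≤ n) (hn16 : n ≤ 16) : 0 < (convertN k n).length := by
  unfold convertN
  split
  · decide
  · rename_i hk
    rw [List.length_reverse]
    simp only [convertNloop]
    rw [if_neg hk]
    have h1 := digitChars_pos n k hn2 hn16
    have h2 := convertNloop_length_mono n k.toNat ([] ++ digitChars n k) (PySem.Int.floordiv k n)
    simp at h2 ⊢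
    omega

lemma pref_zero (n : Int) : pref n 0 = [] := rfl

lemma pref_succ (n : Int) (k : Nat) : pref n (k + 1) = pref n k ++ convertN (k : Int) n := by
  simp [pref, List.range_succ]

lemma pref_prefix (n : Int) {a b : Nat} (h : a ≤ b) : pref n a <+: pref n b := by
  obtain ⟨c, rfl⟩ := Nat.exists_eq_add_of_le h
  clear h
  induction c with
  | zero => exact List.prefix_refl _
  | succ c ih =>
    have : a + (c + 1) = (a + c) + 1 := by omega
    rw [this, pref_succ]
    exact ih.trans (List.prefix_append _ _)

lemma pref_length (n : Int) (hn2 : 2 ≤ n) (hn16 : n ≤ 16) (k : Nat) : k ≤ (pref n k).length := by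
  induction k with
  | zero => simp [pref_zero]
  | succ k ih =>
    rw [pref_succ, List.length_append]
    have := convertN_length_pos n (k : Int) hn2 hn16
    omega

lemma stream_eq (n : Int) (hn2 : 2 ≤ n) (hn16 : n ≤ 16) (N : Nat) (i : Int) (_hi : 0 ≤ i)
    (hlen : i.toNat < (pref n N).length) : (pref n N).getD i.toNat ' ' = stream n i := by
  unfold stream
  have hl : i.toNat < (pref n (i.toNat + 1)).length :=
    lt_of_lt_of_le (Nat.lt_succ_self _) (pref_length n hn2 hn16 _)
  rw [List.getD_eq_getElem?_getD, List.getD_eq_getElem?_getD]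
  congr 1
  rcases le_total (i.toNat + 1) N with h | h
  · obtain ⟨tl, htl⟩ := pref_prefix n h
    rw [← htl, List.getElem?_append_left hl]
  · obtain ⟨tl, htl⟩ := pref_prefix n h
    rw [← htl, List.getElem?_append_left hlen]

lemma idxSeq_nil (m mt i : Int) (h : mt ≤ i) : idxSeq m mt i = [] := by
  rw [idxSeq]; rw [dif_neg]; omega

lemma idxSeq_cons (m mt i : Int) (hm : 1 ≤ m) (hi : i < mt) :
    idxSeq m mt i = i :: idxSeq m mt (i + m) := by
  rw [idxSeq]; rw [dif_pos ⟨hm, hi⟩]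

lemma idxSeq_mem_fuel (m mt : Int) : ∀ (fuel : Nat) (i : Int), (mt - i).toNat ≤ fuel →
    ∀ j ∈ idxSeq m mt i, i ≤ j ∧ j < mt := by
  intro fuel
  induction fuel with
  | zero =>
    intro i hf j hj
    rw [idxSeq_nil m mt i (by omega)] at hj
    exact absurd hj (List.not_mem_nil)
  | succ f ih =>
    intro i hf j hj
    by_cases hc : 1 ≤ m ∧ i < mt
    · rw [idxSeq, dif_pos hc] at hj
      rcases List.mem_cons.mp hj with rfl | hj'
      · exact ⟨le_refl _, hc.2⟩
      · have := ih (i + m) (by omega) j hj'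
        constructor <;> omega
    · rw [idxSeq, dif_neg hc] at hj
      exact absurd hj (List.not_mem_nil)

lemma idxSeq_mem (m mt : Int) : ∀ (i : Int) (j : Int), j ∈ idxSeq m mt i → i ≤ j ∧ j < mt := by
  intro i j hj
  exact idxSeq_mem_fuel m mt (mt - i).toNat i (le_refl _) j hj

lemma idxSeq_le_getLast?_fuel (m mt : Int) : ∀ (fuel : Nat) (i : Int), (mt - i).toNat ≤ fuel →
    ∀ (L : Int), (idxSeq m mt i).getLast? = some L → ∀ j ∈ idxSeq m mt i, j ≤ L := by
  intro fuel
  induction fuel with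
  | zero =>
    intro i hf L hL j hj
    rw [idxSeq_nil m mt i (by omega)] at hj
    exact absurd hj (List.not_mem_nil)
  | succ f ih =>
    intro i hf L hL j hj
    by_cases hc : 1 ≤ m ∧ i < mt
    · rw [idxSeq_cons m mt i hc.1 hc.2] at hj hL
      cases hr : idxSeq m mt (i + m) with
      | nil =>
        rw [hr] at hj hL
        simp at hj hL
        omega
      | cons r0 rs =>
        rw [hr] at hj hL
        rw [List.getLast?_cons_cons] at hL
        rcases List.mem_cons.mp hj with rfl | hj'
        · have h2 : (r0 :: rs).getLast (by simp) = L := by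
            have h1 := List.getLast?_eq_some_getLast (l := r0 :: rs) (by simp)
            rw [h1] at hL
            exact Option.some_inj.mp hL
          have hLmem : L ∈ r0 :: rs := h2 ▸ List.getLast_mem _
          have hLmem' : L ∈ idxSeq m mt (j + m) := by rw [hr]; exact hLmem
          have := idxSeq_mem m mt (j + m) L hLmem'
          omega
        · exact ih (i + m) (by omega) L (by rw [hr]; exact hL) j (by rw [hr]; exact hj')
    · rw [idxSeq, dif_neg hc] at hj
      exact absurd hj (List.not_mem_nil)

lemma idxSeq_le_getLast (m mt : Int) (i : Int) (h : idxSeq m mt i ≠ []) :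
    ∀ j ∈ idxSeq m mt i, j ≤ (idxSeq m mt i).getLast h := by
  intro j hj
  exact idxSeq_le_getLast?_fuel m mt (mt - i).toNat i (le_refl _) _
    (List.getLast?_eq_some_getLast h) j hj

lemma arr_getD_toList {α : Type} [Inhabited α] (a : Array α) (k : Nat) (d : α) :
    a.getD k d = a.toList.getD k d := by
  by_cases h : k < a.size
  · simp [Array.getD, h, List.getD_eq_getElem?_getD, Array.length_toList, Array.getElem_toList]
  · have hk : a.toList.length ≤ k := by simp [Array.length_toList]; omega
    simp [Array.getD, h, List.getD_eq_getElem?_getD, List.getElem?_eq_none hk]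

lemma join_foldl_toList (l : List (List Char)) (a : Array Char) :
    (l.foldl (fun acc s => acc ++ s.toArray) a).toList = a.toList ++ l.flatten := by
  induction l generalizing a with
  | nil => simp
  | cons x xs ih => simp [ih, List.flatten_cons]

lemma idxLoop_eq (m mt : Int) (hm : 1 ≤ m) : ∀ (fuel : Nat) (acc : Array Int) (i : Int),
    (mt - i).toNat < fuel → (idxLoop m mt fuel acc i).toList = acc.toList ++ idxSeq m mt i := by
  intro fuel
  induction fuel with
  | zero => intro acc i h; omega
  | succ f ih =>
    intro acc i h
    simp only [idxLoop]
    by_cases hi : i < mt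
    · rw [if_pos hi, ih _ _ (by omega), idxSeq_cons m mt i hm hi]
      simp
    · rw [if_neg hi, idxSeq_nil m mt i (by omega), List.append_nil]

lemma idxLoop_stop (m mt : Int) (i : Int) (h : ¬ i < mt) : ∀ (fuel : Nat) (acc : Array Int),
    idxLoop m mt fuel acc i = acc := by
  intro fuel; induction fuel with
  | zero => intro acc; rfl
  | succ f _ => intro acc; simp [idxLoop, h]

lemma genLoop_eq (n : Int) (hn2 : 2 ≤ n) (hn16 : n ≤ 16) (need : Int) :
    ∀ (fuel : Nat) (pieces : Array (List Char)) (total num : Int),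
    0 ≤ num → pieces.toList.flatten = pref n num.toNat → total = (pieces.toList.flatten.length : Int) →
    (need - total).toNat < fuel →
    ∃ N : Nat, (genLoop n need fuel pieces total num).toList.flatten = pref n N ∧
      need ≤ ((pref n N).length : Int) := by
  intro fuel
  induction fuel with
  | zero => intro pieces total num _ _ _ h; omega
  | succ f ih =>
    intro pieces total num hnum hflat htot hfuel
    simp only [genLoop]
    by_cases hc : total < need
    · rw [if_pos hc]
      have hcpos : 0 < (convertN num n).length := convertN_length_pos n num hn2 hn16
      apply ih
      · omega
      · have h1 : (num + 1).toNat = num.toNat + 1 := by omega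
        rw [h1, pref_succ, ← hflat, Int.toNat_of_nonneg hnum]
        simp [Array.toList_push]
      · rw [htot]
        simp [PySem.List.len_eq, Array.toList_push]
      · simp only [PySem.List.len_eq]
        omega
    · rw [if_neg hc]
      refine ⟨num.toNat, hflat, ?_⟩
      rw [← hflat]
      omega

lemma solLoopA_stop (n m mt : Int) (i : Int) (h : ¬ i < mt) :
    ∀ (fuel : Nat) (ans temp : Array Char) (num : Int),
    solLoopA n m mt fuel ans temp num i = ans := by
  intro fuel; induction fuel with
  | zero => intro ans temp num; rfl
  | succ f _ => intro ans temp num; simp [solLoopA, h]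

lemma solLoopA_eq (n m mt : Int) (hn2 : 2 ≤ n) (hn16 : n ≤ 16) (hm : 1 ≤ m) :
    ∀ (fuel : Nat) (ans temp : Array Char) (num i : Int),
    0 ≤ num → temp.toList = pref n num.toNat → 0 ≤ i →
    (mt - i).toNat + (mt - (temp.size : Int)).toNat < fuel →
    (solLoopA n m mt fuel ans temp num i).toList = ans.toList ++ (idxSeq m mt i).map (stream n) := by
  intro fuel
  induction fuel with
  | zero => intro ans temp num i _ _ _ h; omega
  | succ f ih =>
    intro ans temp num i hnum htemp hi hfuel
    simp only [solLoopA]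
    by_cases himt : i < mt
    · rw [if_pos himt]
      by_cases hg : (temp.size : Int) - 1 < i
      · rw [if_pos hg]
        have hcpos : 0 < (convertN num n).length := convertN_length_pos n num hn2 hn16
        apply ih
        · omega
        · have h1 : (num + 1).toNat = num.toNat + 1 := by omega
          rw [h1, pref_succ, ← htemp, Int.toNat_of_nonneg hnum]
          simp [Array.toList_append]
        · exact hi
        · simp only [Array.size_append, List.size_toArray]
          omega
      · rw [if_neg hg]
        have hsz : temp.size = temp.toList.length := (Array.length_toList).symm
        have hlt : i < (temp.size : Int) := by omega
        have hlen : i.toNat < temp.toList.length := by omega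
        have hidx : temp.getD i.toNat ' ' = stream n i := by
          rw [arr_getD_toList temp i.toNat ' ', htemp]
          exact stream_eq n hn2 hn16 num.toNat i hi (htemp ▸ hlen)
        rw [hidx, idxSeq_cons m mt i hm himt,
          ih (ans.push (stream n i)) temp num (i + m) hnum htemp (by omega) (by omega)]
        simp [Array.toList_push]
    · rw [if_neg himt, idxSeq_nil m mt i (by omega)]
      simp

-- ===== VERDICT (by name: the statement is the Claim_ definition above) =====
theorem solution_spec : Claim_equal_solution := by
  intro n t m p hdom hpre
  unfold Spec_solution
  simp only [solution, solution_alt]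
  rcases hpre with h1 | ⟨hp, hm, hn2, hn16⟩
  · rw [solLoopA_stop n m (m * t) (p - 1) (by omega)]
    rw [idxLoop_stop m (m * t) (p - 1) (by omega)]
    simp
  · have hfA : (m * t - (p - 1)).toNat + ((m * t) - ((#[] : Array Char).size : Int)).toNat
        < (m * t - (p - 1)).toNat + (m * t).toNat + 1 := by simp
    rw [solLoopA_eq n m (m * t) hn2 hn16 hm _ #[] #[] 0 (p - 1) (le_refl 0) rfl (by omega) hfA]
    rw [idxLoop_eq m (m * t) hm _ #[] (p - 1) (by omega)]
    simp only [Array.toList_empty, List.nil_append]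
    by_cases hnil : idxSeq m (m * t) (p - 1) = []
    · rw [hnil]
      simp
    · rw [if_neg (by simp [hnil])]
      rw [PySem.List.pyGetD_neg_one _ 0 hnil]
      obtain ⟨N, hflat, hlen⟩ := genLoop_eq n hn2 hn16 ((idxSeq m (m * t) (p - 1)).getLast hnil + 1)
        (((idxSeq m (m * t) (p - 1)).getLast hnil + 1).toNat + 1) #[] 0 0 (le_refl 0) rfl (by simp)
        (by omega)
      have hjoin : ((genLoop n ((idxSeq m (m * t) (p - 1)).getLast hnil + 1)
          (((idxSeq m (m * t) (p - 1)).getLast hnil + 1).toNat + 1) #[] 0 0).foldl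
          (fun acc s => acc ++ s.toArray) (#[] : Array Char)).toList = pref n N := by
        rw [← Array.foldl_toList, join_foldl_toList]
        simpa using hflat
      congr 1
      apply List.map_congr_left
      intro j hj
      obtain ⟨hj1, hj2⟩ := idxSeq_mem m (m * t) (p - 1) j hj
      have hjL : j ≤ (idxSeq m (m * t) (p - 1)).getLast hnil :=
        idxSeq_le_getLast m (m * t) _ hnil j hj
      have h0j : 0 ≤ j := by omega
      have hjlen' : j.toNat < (pref n N).length := by omega
      symm
      rw [arr_getD_toList, hjoin]
      exact stream_eq n hn2 hn16 N j h0j hjlen'
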